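-- pv_equiv track=rewrite | github.com/Nicotcy/arb-scanner | scanner.py | _looks_like_player_prop
-- ===== SOURCE A (Python) =====
-- def _looks_like_player_prop(ticker: str) -> bool:
--     t = ticker.upper()
--     prop_markers = (
--         "PTS",
--         "REB",
--         "AST",
--         "STL",
--         "BLK",
--         "3PT",
--         "RSH",
--         "PASS",
--         "REC",
--         "TD",
--         "YDS",
--         "GOALS",
--         "SACK",
--         "INT",
--         "BTTS",
--     )
--     return any(m in t for m in prop_markers)
-- ===== SOURCE B (Python) =====
-- _PROP_MARKERS = (
--     "PTS", "REB", "AST", "STL", "BLK", "3PT", "RSH", "PASS",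
--     "REC", "TD", "YDS", "GOALS", "SACK", "INT", "BTTS",
-- )
--
--
-- def _looks_like_player_prop(ticker: str) -> bool:
--     # One left-to-right scan over positions: at each index, test whether any
--     # marker starts there, instead of one full substring search per marker.
--     t = ticker.upper()
--     for i in range(len(t)):
--         for m in _PROP_MARKERS:
--             if t.startswith(m, i):
--                 return True
--     return False
-- ===== Notes on version B (the rewrite author's own statement) =====
-- stated objective: alternative
-- what changed: B makes a single left-to-right scan over string positions, testing at each index whether any marker starts there (startswith with an offset), instead of A's per-marker full substring-membership searches.
import Mathlib
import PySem

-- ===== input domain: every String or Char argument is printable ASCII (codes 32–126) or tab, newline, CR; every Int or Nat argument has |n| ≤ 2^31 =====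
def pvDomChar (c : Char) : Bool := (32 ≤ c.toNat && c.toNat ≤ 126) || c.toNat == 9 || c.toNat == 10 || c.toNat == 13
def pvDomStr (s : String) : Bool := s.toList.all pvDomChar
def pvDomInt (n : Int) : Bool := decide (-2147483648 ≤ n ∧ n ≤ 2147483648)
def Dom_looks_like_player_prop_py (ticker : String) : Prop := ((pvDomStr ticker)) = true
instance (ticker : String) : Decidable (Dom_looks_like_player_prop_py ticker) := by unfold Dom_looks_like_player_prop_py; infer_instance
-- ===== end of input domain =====

-- B replaces A's per-marker substring searches by one left-to-right position scan
-- testing each marker as a prefix at each index (alternative, same cost).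

-- the marker tuple, shared by both sources
def pvMarkers : List String :=
  ["PTS", "REB", "AST", "STL", "BLK", "3PT", "RSH", "PASS",
   "REC", "TD", "YDS", "GOALS", "SACK", "INT", "BTTS"]

-- ===== PORT A =====
def looks_like_player_prop_py (ticker : String) : Bool :=
  let t := PySem.Str.upper ticker
  pvMarkers.any (fun m => PySem.Str.isIn m t)

-- ===== PORT B =====
-- t.startswith(m, i) with 0 ≤ i is ported exactly as a prefix test on t.toList.drop i.toNat
def looks_like_player_prop_py_alt (ticker : String) : Bool :=
  let t := PySem.Str.upper ticker
  (PySem.List.pyRange 0 (PySem.Str.len t) 1).any (fun i =>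
    pvMarkers.any (fun m => PySem.Chars.startswith (t.toList.drop i.toNat) m.toList))

-- ===== PRECONDITION & SPEC =====
def Spec_looks_like_player_prop_py (ticker : String) (out : Bool) : Prop := out = looks_like_player_prop_py_alt ticker
instance (ticker : String) (out : Bool) : Decidable (Spec_looks_like_player_prop_py ticker out) := by unfold Spec_looks_like_player_prop_py; infer_instance

-- ===== CLAIM (what is proved, stated in full; the proofs are below) =====
def Claim_equal_looks_like_player_prop_py : Prop := ∀ (ticker : String), Dom_looks_like_player_prop_py ticker → Spec_looks_like_player_prop_py ticker (looks_like_player_prop_py ticker)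

-- ===== LEMMAS AND PROOFS =====

theorem pvMarkers_ne_nil : ∀ m ∈ pvMarkers, m.toList ≠ [] := by decide

-- core equivalence on char lists: "some marker is an infix" = "some position where some marker is a prefix"
theorem pv_key (cs : List Char) :
    pvMarkers.any (fun m => PySem.Chars.isIn m.toList cs)
      = (PySem.List.pyRange 0 (cs.length : Int) 1).any (fun i =>
          pvMarkers.any (fun m => PySem.Chars.startswith (cs.drop i.toNat) m.toList)) := by
  rw [Bool.eq_iff_iff]
  simp only [List.any_eq_true, PySem.Chars.isIn_iff_infix, PySem.Chars.startswith_iff,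
    PySem.List.mem_pyRange_one]
  constructor
  · rintro ⟨m, hm, hinf⟩
    have hj : ∃ j, m.toList <+: cs.drop j :=
      (PySem.Chars.exists_prefix_drop_iff_isIn m.toList cs).mpr
        ((PySem.Chars.isIn_iff_infix m.toList cs).mpr hinf)
    obtain ⟨j, hpre⟩ := hj
    by_cases hlt : j < cs.length
    · exact ⟨(j : Int), ⟨by positivity, by exact_mod_cast hlt⟩, m, hm, by simpa using hpre⟩
    · exfalso
      have : cs.drop j = [] := List.drop_eq_nil_of_le (le_of_not_gt hlt)
      rw [this, List.prefix_nil] at hpre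
      exact pvMarkers_ne_nil m hm hpre
  · rintro ⟨i, ⟨_, _⟩, m, hm, hpre⟩
    exact ⟨m, hm, hpre.isInfix.trans (List.drop_suffix i.toNat cs).isInfix⟩

-- ===== VERDICT (by name: the statement is the Claim_ definition above) =====
theorem looks_like_player_prop_py_spec : Claim_equal_looks_like_player_prop_py := by
  intro ticker _
  unfold Spec_looks_like_player_prop_py looks_like_player_prop_py looks_like_player_prop_py_alt
  simpa using pv_key (PySem.Str.upper ticker).toList
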